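-- pv_equiv track=rewrite | github.com/Kwounsu/Algorithms | 프로그래머스/2개 이하로 다른 비트.py | solution
-- ===== SOURCE A (Python) =====
-- def solution(numbers):
--     def bin_to_int(b):
--         return int('0b' + ''.join(b), 2)
--
--     def change_one_to_zero(b, k):
--         for j in range(k, len(b)):
--             if b[j] == '1':
--                 b[j] = '0'
--                 break
--
--     answer = []
--
--     for number in numbers:
--         if number % 2 == 0:
--             answer.append(number + 1)
--         else:
--             bin_num = list(bin(number)[2:])
--             if '0' not in bin_num:
--                 bin_num = ['1', '0'] + bin_num[1:]
--             else:
--                 for i in range(len(bin_num) - 1, -1, -1):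
--                     if bin_num[i] == '0':
--                         bin_num[i] = '1'
--                         change_one_to_zero(bin_num, i + 1)
--                         break
--             answer.append(bin_to_int(bin_num))
--
--     return answer
-- ===== SOURCE B (Python) =====
-- def solution(numbers):
--     # even: flip bit 0; odd: (~n)&(n+1) is the lowest zero bit of n
--     return [n + 1 if n % 2 == 0 else n + (((~n) & (n + 1)) >> 1) for n in numbers]
-- ===== Notes on version B (the rewrite author's own statement) =====
-- stated objective: simpler
-- what changed: Replaces A's per-number construction of the binary string and two index scans (flip the last '0', zero the following '1') with a one-line two's-complement bit identity per element: even -> n+1, odd -> n + (((~n)&(n+1))>>1).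
-- outside the precondition, e.g. on solution([-1]): A returns [5], B returns [-1]; on solution([-5]): A raises ValueError, B returns [-3]
import Mathlib
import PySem

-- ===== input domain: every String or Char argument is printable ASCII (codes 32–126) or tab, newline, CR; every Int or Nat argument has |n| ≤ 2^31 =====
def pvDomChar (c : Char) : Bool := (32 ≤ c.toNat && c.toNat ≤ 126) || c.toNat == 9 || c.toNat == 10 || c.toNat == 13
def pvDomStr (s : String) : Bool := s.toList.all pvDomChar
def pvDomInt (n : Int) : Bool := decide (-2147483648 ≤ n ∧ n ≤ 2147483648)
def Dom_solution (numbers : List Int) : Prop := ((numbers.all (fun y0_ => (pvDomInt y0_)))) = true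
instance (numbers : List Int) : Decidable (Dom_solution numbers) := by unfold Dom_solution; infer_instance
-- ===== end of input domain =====

-- B replaces A's per-number binary-string surgery (build bin(n), flip the last '0', zero the next '1')
-- with a two's-complement bit identity per element: even → n+1, odd → n + (((~n)&(n+1))>>1) (objective: simpler).


-- ===== PORT A =====
-- bin(number)[2:] as a list of chars, most significant digit first (A only calls it on odd n ≥ 1 inside Pre_,
-- where this is exact; binChars 0 = [] is never reached there)
def binChars (n : Nat) : List Char :=
  if n = 0 then [] else binChars (n / 2) ++ [if n % 2 = 1 then '1' else '0']

-- int('0b' + ''.join(b), 2)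
def binToInt (b : List Char) : Int :=
  b.foldl (fun acc c => acc * 2 + (if c = '1' then 1 else 0)) 0

-- change_one_to_zero(b, k): its forward scan over the suffix b[k:] — zero the first '1'
def changeOneToZero : List Char → List Char
  | [] => []
  | c :: rest => if c = '1' then '0' :: rest else c :: changeOneToZero rest

-- the `for i in range(len(bin_num)-1, -1, -1)` scan: at the LAST '0', set it to '1' and run
-- change_one_to_zero on the suffix after it ("'0' ∈ rest" = "a zero occurs further right: keep scanning")
def setLastZeroThenFix : List Char → List Char
  | [] => []
  | c :: rest =>
    if '0' ∈ rest then c :: setLastZeroThenFix rest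
    else if c = '0' then '1' :: changeOneToZero rest
    else c :: rest

def solution (numbers : List Int) : List Int :=
  numbers.foldl (fun answer number =>
    if PySem.Int.mod number 2 = 0 then answer ++ [number + 1]
    else
      let bin_num := binChars number.toNat
      let bin_num := if '0' ∉ bin_num then '1' :: '0' :: bin_num.tail
                     else setLastZeroThenFix bin_num
      answer ++ [binToInt bin_num]) []

-- ===== PORT B =====
-- `(~n) & (n+1)` is Int.land (~~~n) (n+1) (Python & on int, two's complement); `>> 1` is >>> (1:Nat)
def solution_alt (numbers : List Int) : List Int :=
  numbers.map (fun n =>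
    if PySem.Int.mod n 2 = 0 then n + 1
    else n + (Int.land (~~~n) (n + 1)) >>> (1 : Nat))

-- ===== PRECONDITION & SPEC =====
-- Pre_ excludes lists with a negative odd element: there A's string surgery runs on bin()'s '-0b' form and
-- either raises ValueError or returns an accidental value built from the misparsed sign characters.
def Pre_solution (numbers : List Int) : Prop :=
  ∀ n ∈ numbers, PySem.Int.mod n 2 = 0 ∨ 0 ≤ n
instance (numbers : List Int) : Decidable (Pre_solution numbers) := by unfold Pre_solution; infer_instance
def pvWitness_solution : List Int := [2, 7, -4, 0, 13]

def Spec_solution (numbers : List Int) (out : List Int) : Prop := out = solution_alt numbers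
instance (numbers : List Int) (out : List Int) : Decidable (Spec_solution numbers out) := by unfold Spec_solution; infer_instance

-- ===== CLAIM (what is proved, stated in full; the proofs are below) =====
def Claim_equal_solution : Prop := ∀ (numbers : List Int), Dom_solution numbers → Pre_solution numbers → Spec_solution numbers (solution numbers)

-- ===== LEMMAS AND PROOFS =====

-- A's per-element result, named for the proofs
def fA (number : Int) : Int :=
  if PySem.Int.mod number 2 = 0 then number + 1
  else
    let bin_num := binChars number.toNat
    let bin_num := if '0' ∉ bin_num then '1' :: '0' :: bin_num.tail
                   else setLastZeroThenFix bin_num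
    binToInt bin_num

-- B's per-element result
def fB (n : Int) : Int :=
  if PySem.Int.mod n 2 = 0 then n + 1
  else n + (Int.land (~~~n) (n + 1)) >>> (1 : Nat)

theorem binToInt_general (b : List Char) (acc : Int) :
    b.foldl (fun acc c => acc * 2 + (if c = '1' then 1 else 0)) acc
      = acc * 2 ^ b.length + binToInt b := by
  induction b generalizing acc with
  | nil => simp [binToInt]
  | cons c rest ih =>
    simp only [List.foldl_cons, List.length_cons, binToInt]
    rw [ih, ih (0 * 2 + _)]
    ring

theorem binToInt_append (p q : List Char) :
    binToInt (p ++ q) = binToInt p * 2 ^ q.length + binToInt q := by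
  unfold binToInt
  rw [List.foldl_append, binToInt_general]
  rfl

theorem binToInt_replicate_one (t : Nat) :
    binToInt (List.replicate t '1') = 2 ^ t - 1 := by
  induction t with
  | zero => simp [binToInt]
  | succ s ih =>
    rw [List.replicate_succ, show ('1' :: List.replicate s '1') = ['1'] ++ List.replicate s '1' from rfl,
      binToInt_append, ih]
    simp [binToInt]
    ring

theorem binToInt_binChars (m : Nat) : binToInt (binChars m) = (m : Int) := by
  induction m using Nat.strong_induction_on with
  | _ m ih =>
    unfold binChars
    split
    · simp [binToInt, *]
    · rename_i h
      rw [binToInt_append, ih (m / 2) (Nat.div_lt_self (Nat.pos_of_ne_zero h) one_lt_two)]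
      have h2 := Nat.div_add_mod m 2
      rcases Nat.mod_two_eq_zero_or_one m with h1 | h1 <;> simp [binToInt, h1] <;> omega

theorem binChars_two_mul (c : Nat) (hc : c ≠ 0) :
    binChars (2 * c) = binChars c ++ ['0'] := by
  rw [binChars]
  have : 2 * c ≠ 0 := by omega
  simp [this, Nat.mul_mod_right]

theorem binChars_peel (t c : Nat) :
    binChars (2 * c * 2 ^ t + (2 ^ t - 1))
      = binChars (2 * c) ++ List.replicate t '1' := by
  induction t with
  | zero => simp
  | succ s ih =>
    have hp : 0 < 2 ^ s := Nat.two_pow_pos s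
    have hm : 2 * c * 2 ^ (s + 1) = 2 * (2 * c * 2 ^ s) := by ring
    have hkey : 2 * c * 2 ^ (s + 1) + (2 ^ (s + 1) - 1)
        = 2 * (2 * c * 2 ^ s + (2 ^ s - 1)) + 1 := by
      rw [hm, pow_succ]; omega
    rw [hkey, binChars]
    have hne : 2 * (2 * c * 2 ^ s + (2 ^ s - 1)) + 1 ≠ 0 := by omega
    simp only [hne, if_false]
    rw [Nat.mul_add_div (by norm_num), Nat.mul_add_mod]
    norm_num
    rw [ih, List.replicate_succ']
    simp [List.append_assoc]

theorem zero_not_mem_replicate (t : Nat) : '0' ∉ List.replicate t '1' := by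
  simp [List.mem_replicate]

theorem changeOneToZero_replicate (t : Nat) (ht : 1 ≤ t) :
    changeOneToZero (List.replicate t '1') = '0' :: List.replicate (t - 1) '1' := by
  obtain ⟨s, rfl⟩ : ∃ s, t = s + 1 := ⟨t - 1, by omega⟩
  rw [List.replicate_succ, changeOneToZero]
  simp

theorem setLastZeroThenFix_append (p : List Char) (t : Nat) :
    setLastZeroThenFix (p ++ '0' :: List.replicate t '1')
      = p ++ '1' :: changeOneToZero (List.replicate t '1') := by
  induction p with
  | nil =>
    simp only [List.nil_append, setLastZeroThenFix]
    simp
  | cons c rest ih =>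
    rw [List.cons_append, setLastZeroThenFix]
    have : '0' ∈ rest ++ '0' :: List.replicate t '1' := by simp
    simp only [this, if_true, ih, List.cons_append]

theorem decomp_odd (a : Nat) (h : a % 2 = 1) :
    ∃ t c, 1 ≤ t ∧ a = 2 * c * 2 ^ t + (2 ^ t - 1) := by
  induction a using Nat.strong_induction_on with
  | _ a ih =>
    rcases Nat.mod_two_eq_zero_or_one (a / 2) with h1 | h1
    · refine ⟨1, a / 4, le_refl 1, ?_⟩
      have : 2 * (a / 4) * 2 ^ 1 = 4 * (a / 4) := by ring
      omega
    · obtain ⟨t, c, ht, hc⟩ := ih (a / 2) (by omega) h1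
      refine ⟨t + 1, c, by omega, ?_⟩
      have hp : 0 < 2 ^ t := Nat.two_pow_pos t
      have hm : 2 * c * 2 ^ (t + 1) = 2 * (2 * c * 2 ^ t) := by ring
      rw [pow_succ] at hm ⊢
      omega

theorem ldiff_key (t c : Nat) (ht : 1 ≤ t) :
    Nat.ldiff (2 * c * 2 ^ t + (2 ^ t - 1) + 1) (2 * c * 2 ^ t + (2 ^ t - 1)) = 2 ^ t := by
  have hp : 0 < 2 ^ t := Nat.two_pow_pos t
  apply Nat.eq_of_testBit_eq
  intro i
  rw [Nat.testBit_ldiff, Nat.testBit_two_pow]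
  have hr : 2 * c * 2 ^ t = 2 ^ t * (2 * c) := by ring
  have e1 : 2 * c * 2 ^ t + (2 ^ t - 1) + 1 = 2 ^ t * (2 * c + 1) + 0 := by
    rw [hr]
    have : 2 ^ t * (2 * c) + 2 ^ t = 2 ^ t * (2 * c + 1) := by ring
    omega
  have e2 : 2 * c * 2 ^ t + (2 ^ t - 1) = 2 ^ t * (2 * c) + (2 ^ t - 1) := by rw [hr]
  rw [e1, e2, Nat.testBit_two_pow_mul_add _ hp, Nat.testBit_two_pow_mul_add _ (by omega)]
  by_cases hi : i < t
  · simp [hi, Nat.testBit_two_pow_sub_one]; omega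
  · simp only [hi, if_false]
    by_cases he : i = t
    · subst he
      simp [Nat.testBit_two_pow_sub_one]
    · obtain ⟨j, hj⟩ : ∃ j, i - t = j + 1 := ⟨i - t - 1, by omega⟩
      rw [hj, Nat.testBit_succ, Nat.testBit_succ]
      have h1 : (2 * c + 1 + 0) / 2 = c := by omega
      have h2 : (2 * c) / 2 = c := by omega
      rw [h1, h2]
      simp only [Bool.and_not_self]
      simp
      omega

theorem land_not_ofNat' (a : Nat) :
    Int.land (~~~(a : Int)) (((a + 1 : Nat)) : Int) = (Nat.ldiff (a + 1) a : Int) := rfl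

theorem shift_pow (t : Nat) (ht : 1 ≤ t) : ((2 ^ t : Nat) : Int) >>> (1 : Nat) = ((2 ^ (t-1) : Nat) : Int) := by
  have h1 : ((2 ^ t : Nat) : Int) >>> (1 : Nat) = (((2 ^ t : Nat) >>> 1 : Nat) : Int) := rfl
  rw [h1, Nat.shiftRight_one]
  congr 1
  obtain ⟨s, rfl⟩ : ∃ s, t = s + 1 := ⟨t - 1, by omega⟩
  simp [pow_succ]

theorem cast_sum_sub (c s : Nat) :
    ((2 * c * 2 ^ s + (2 ^ s - 1) : Nat) : Int) = 2 * (c:Int) * 2 ^ s + ((2:Int) ^ s - 1) := by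
  have h1 : (1:Nat) ≤ 2 ^ s := Nat.one_le_two_pow
  push_cast [h1]
  ring

theorem fB_odd (t c : Nat) (ht : 1 ≤ t)
    (hm : ¬ PySem.Int.mod ((2 * c * 2 ^ t + (2 ^ t - 1) : Nat) : Int) 2 = 0) :
    fB ((2 * c * 2 ^ t + (2 ^ t - 1) : Nat) : Int)
      = ((2 * c * 2 ^ t + (2 ^ t - 1) : Nat) : Int) + ((2 ^ (t - 1) : Nat) : Int) := by
  rw [fB, if_neg hm]
  have h1 : (((2 * c * 2 ^ t + (2 ^ t - 1) : Nat) : Int) + 1)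
      = (((2 * c * 2 ^ t + (2 ^ t - 1) + 1 : Nat)) : Int) := by push_cast; ring
  rw [h1, land_not_ofNat', ldiff_key t c ht, shift_pow t ht]

theorem fA_odd (t c : Nat) (ht : 1 ≤ t)
    (hm : ¬ PySem.Int.mod ((2 * c * 2 ^ t + (2 ^ t - 1) : Nat) : Int) 2 = 0) :
    fA ((2 * c * 2 ^ t + (2 ^ t - 1) : Nat) : Int)
      = ((2 * c * 2 ^ t + (2 ^ t - 1) : Nat) : Int) + ((2 ^ (t - 1) : Nat) : Int) := by
  rw [fA, if_neg hm]
  simp only [Int.toNat_natCast]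
  rw [binChars_peel, cast_sum_sub]
  obtain ⟨s, rfl⟩ : ∃ s, t = s + 1 := ⟨t - 1, by omega⟩
  simp only [Nat.add_sub_cancel]
  have hcs : ((2 ^ s : Nat) : Int) = (2:Int) ^ s := by push_cast; ring
  by_cases hc : c = 0
  · subst hc
    have hbn : binChars (2 * 0) = [] := by simp [binChars]
    rw [hbn, List.nil_append]
    rw [if_pos (zero_not_mem_replicate (s + 1))]
    rw [List.replicate_succ, List.tail_cons]
    rw [show ('1' :: '0' :: List.replicate s '1') = ['1','0'] ++ List.replicate s '1' from rfl,
      binToInt_append, binToInt_replicate_one]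
    have hv : binToInt ['1','0'] = 2 := by decide
    rw [hv]
    simp only [List.length_replicate, hcs]
    push_cast
    ring
  · rw [binChars_two_mul c hc]
    rw [if_neg (by simp)]
    rw [List.append_assoc, List.singleton_append, setLastZeroThenFix_append,
      changeOneToZero_replicate (s + 1) (by omega)]
    simp only [Nat.add_sub_cancel]
    rw [show ('1' :: '0' :: List.replicate s '1') = ['1','0'] ++ List.replicate s '1' from rfl]
    rw [binToInt_append, binToInt_append, binToInt_replicate_one, binToInt_binChars]
    have hv : binToInt ['1','0'] = 2 := by decide
    rw [hv]
    simp only [List.length_append, List.length_cons, List.length_replicate, hcs]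
    ring_nf
    norm_num

theorem fA_eq_fB (n : Int) (h : PySem.Int.mod n 2 = 0 ∨ 0 ≤ n) : fA n = fB n := by
  by_cases hm : PySem.Int.mod n 2 = 0
  · rw [fA, fB, if_pos hm, if_pos hm]
  · have hn : 0 ≤ n := h.resolve_left hm
    obtain ⟨a, rfl⟩ : ∃ a : Nat, n = (a : Int) := ⟨n.toNat, (Int.toNat_of_nonneg hn).symm⟩
    have hodd : a % 2 = 1 := by
      rcases Nat.mod_two_eq_zero_or_one a with h1 | h1
      · refine absurd ?_ hm
        have h2 : PySem.Int.mod (a : Int) 2 = (a : Int) % 2 :=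
          PySem.Int.mod_eq_emod_of_pos (by norm_num)
        omega
      · exact h1
    obtain ⟨t, c, ht, rfl⟩ := decomp_odd a hodd
    rw [fA_odd t c ht hm, fB_odd t c ht hm]

theorem solution_foldl (numbers : List Int) (acc : List Int) :
    numbers.foldl (fun answer number =>
      if PySem.Int.mod number 2 = 0 then answer ++ [number + 1]
      else
        let bin_num := binChars number.toNat
        let bin_num := if '0' ∉ bin_num then '1' :: '0' :: bin_num.tail
                       else setLastZeroThenFix bin_num
        answer ++ [binToInt bin_num]) acc = acc ++ numbers.map fA := by
  induction numbers generalizing acc with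
  | nil => simp
  | cons x xs ih =>
    rw [List.foldl_cons, List.map_cons, ih]
    have : (if PySem.Int.mod x 2 = 0 then acc ++ [x + 1]
      else
        let bin_num := binChars x.toNat
        let bin_num := if '0' ∉ bin_num then '1' :: '0' :: bin_num.tail
                       else setLastZeroThenFix bin_num
        acc ++ [binToInt bin_num]) = acc ++ [fA x] := by
      rw [fA]; split <;> rfl
    rw [this, List.append_assoc, List.singleton_append]

theorem solution_eq_map (numbers : List Int) : solution numbers = numbers.map fA := by
  rw [solution, solution_foldl, List.nil_append]

-- ===== VERDICT (by name: the statement is the Claim_ definition above) =====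
theorem solution_spec : Claim_equal_solution := by
  intro numbers _ hpre
  unfold Spec_solution
  rw [solution_eq_map, solution_alt]
  exact List.map_congr_left (fun n hn => fA_eq_fB n (hpre n hn))
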